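-- pv_equiv track=rewrite | github.com/duonghoang231203/Car-Advisor-App | app/services/rag_service.py | _get_vehicle_type_from_query
-- ===== SOURCE A (Python) =====
-- def _get_vehicle_type_from_query(query):
--     """
--     Extract the vehicle type from the query
--
--     Args:
--         query: User query
--
--     Returns:
--         String with vehicle type
--     """
--     query_lower = query.lower()
--
--     # Check for specific vehicle types
--     if any(term in query_lower for term in ["suv", "crossover", "family vehicle"]):
--         return "SUV"
--     elif any(term in query_lower for term in ["sedan", "saloon", "four door"]):
--         return "Sedan"
--     elif any(term in query_lower for term in ["coupe", "sports car", "two door"]):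
--         return "Coupe"
--     elif any(term in query_lower for term in ["truck", "pickup"]):
--         return "Truck"
--     elif any(term in query_lower for term in ["convertible", "cabriolet", "roadster"]):
--         return "Convertible"
--     elif any(term in query_lower for term in ["wagon", "estate", "touring"]):
--         return "Wagon"
--     elif any(term in query_lower for term in ["minivan", "mpv", "van"]):
--         return "Minivan"
--     elif any(term in query_lower for term in ["hatchback", "hot hatch"]):
--         return "Hatchback"
--
--     # Default to SUV if nothing specific found
--     return "SUV"
-- ===== SOURCE B (Python) =====
-- # Single full pass over a flat ranked keyword table, keeping the lowest-rank match.
-- _VEHICLE_KEYWORDS = [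
--     ("suv", 0, "SUV"), ("crossover", 0, "SUV"), ("family vehicle", 0, "SUV"),
--     ("sedan", 1, "Sedan"), ("saloon", 1, "Sedan"), ("four door", 1, "Sedan"),
--     ("coupe", 2, "Coupe"), ("sports car", 2, "Coupe"), ("two door", 2, "Coupe"),
--     ("truck", 3, "Truck"), ("pickup", 3, "Truck"),
--     ("convertible", 4, "Convertible"), ("cabriolet", 4, "Convertible"), ("roadster", 4, "Convertible"),
--     ("wagon", 5, "Wagon"), ("estate", 5, "Wagon"), ("touring", 5, "Wagon"),
--     ("minivan", 6, "Minivan"), ("mpv", 6, "Minivan"), ("van", 6, "Minivan"),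
--     ("hatchback", 7, "Hatchback"), ("hot hatch", 7, "Hatchback"),
-- ]
--
-- def _get_vehicle_type_from_query(query):
--     query_lower = query.lower()
--     best = None  # (rank, vehicle_type) of the best (lowest-rank) keyword seen so far
--     for keyword, rank, vtype in _VEHICLE_KEYWORDS:
--         if keyword in query_lower and (best is None or rank < best[0]):
--             best = (rank, vtype)
--     return best[1] if best is not None else "SUV"
-- ===== Notes on version B (the rewrite author's own statement) =====
-- stated objective: alternative
-- what changed: Replaced the eight-branch if/elif cascade of grouped substring checks with a single full pass over a flat ranked (keyword, rank, vehicle_type) table that keeps the lowest-rank match in an accumulator and falls back to the default type when nothing matches.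
import Mathlib
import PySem

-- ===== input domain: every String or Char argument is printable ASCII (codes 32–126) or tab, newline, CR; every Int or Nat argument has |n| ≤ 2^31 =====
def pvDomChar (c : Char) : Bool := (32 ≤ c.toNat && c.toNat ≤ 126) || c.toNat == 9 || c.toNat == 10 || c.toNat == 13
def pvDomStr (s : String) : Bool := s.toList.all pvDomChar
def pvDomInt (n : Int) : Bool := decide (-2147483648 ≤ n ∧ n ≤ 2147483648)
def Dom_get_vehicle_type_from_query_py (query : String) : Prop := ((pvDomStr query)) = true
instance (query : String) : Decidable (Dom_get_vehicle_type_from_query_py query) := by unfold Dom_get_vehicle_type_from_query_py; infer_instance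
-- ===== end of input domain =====

-- ===== PORT A =====
-- B replaces A's if/elif keyword-group cascade with one full pass over a flat ranked
-- keyword table keeping the lowest-rank match (alternative decomposition, same cost).
def get_vehicle_type_from_query_py (query : String) : String :=
  let query_lower := PySem.Str.lower query
  if ["suv", "crossover", "family vehicle"].any (fun term => PySem.Str.isIn term query_lower) then "SUV"
  else if ["sedan", "saloon", "four door"].any (fun term => PySem.Str.isIn term query_lower) then "Sedan"
  else if ["coupe", "sports car", "two door"].any (fun term => PySem.Str.isIn term query_lower) then "Coupe"
  else if ["truck", "pickup"].any (fun term => PySem.Str.isIn term query_lower) then "Truck"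
  else if ["convertible", "cabriolet", "roadster"].any (fun term => PySem.Str.isIn term query_lower) then "Convertible"
  else if ["wagon", "estate", "touring"].any (fun term => PySem.Str.isIn term query_lower) then "Wagon"
  else if ["minivan", "mpv", "van"].any (fun term => PySem.Str.isIn term query_lower) then "Minivan"
  else if ["hatchback", "hot hatch"].any (fun term => PySem.Str.isIn term query_lower) then "Hatchback"
  else "SUV"

-- ===== PORT B =====
def vehicleKeywords : List (String × Int × String) :=
  [("suv", (0 : Int), "SUV"),
   ("crossover", (0 : Int), "SUV"),
   ("family vehicle", (0 : Int), "SUV"),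
   ("sedan", (1 : Int), "Sedan"),
   ("saloon", (1 : Int), "Sedan"),
   ("four door", (1 : Int), "Sedan"),
   ("coupe", (2 : Int), "Coupe"),
   ("sports car", (2 : Int), "Coupe"),
   ("two door", (2 : Int), "Coupe"),
   ("truck", (3 : Int), "Truck"),
   ("pickup", (3 : Int), "Truck"),
   ("convertible", (4 : Int), "Convertible"),
   ("cabriolet", (4 : Int), "Convertible"),
   ("roadster", (4 : Int), "Convertible"),
   ("wagon", (5 : Int), "Wagon"),
   ("estate", (5 : Int), "Wagon"),
   ("touring", (5 : Int), "Wagon"),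
   ("minivan", (6 : Int), "Minivan"),
   ("mpv", (6 : Int), "Minivan"),
   ("van", (6 : Int), "Minivan"),
   ("hatchback", (7 : Int), "Hatchback"),
   ("hot hatch", (7 : Int), "Hatchback")]

-- the loop body of Source B: update the best (lowest-rank) match seen so far
def vkStep (query_lower : String) (best : Option (Int × String)) (kv : String × Int × String) : Option (Int × String) :=
  if PySem.Str.isIn kv.1 query_lower &&
       (match best with | none => true | some b => decide (kv.2.1 < b.1))
  then some (kv.2.1, kv.2.2) else best

def get_vehicle_type_from_query_py_alt (query : String) : String :=
  let query_lower := PySem.Str.lower query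
  let best := vehicleKeywords.foldl (vkStep query_lower) (none : Option (Int × String))
  match best with
  | some b => b.2
  | none => "SUV"

-- ===== PRECONDITION & SPEC =====
def Spec_get_vehicle_type_from_query_py (query : String) (out : String) : Prop := out = get_vehicle_type_from_query_py_alt query
instance (query : String) (out : String) : Decidable (Spec_get_vehicle_type_from_query_py query out) := by unfold Spec_get_vehicle_type_from_query_py; infer_instance

-- ===== CLAIM (what is proved, stated in full; the proofs are below) =====
def Claim_equal_get_vehicle_type_from_query_py : Prop := ∀ (query : String), Dom_get_vehicle_type_from_query_py query → Spec_get_vehicle_type_from_query_py query (get_vehicle_type_from_query_py query)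

-- ===== LEMMAS AND PROOFS =====

-- once the loop holds a match of rank r, entries of rank ≥ r never replace it
theorem vkStep_foldl_some (ql : String) (t : List (String × Int × String)) (r : Int) (v : String)
    (h : ∀ kv ∈ t, r ≤ kv.2.1) :
    t.foldl (vkStep ql) (some (r, v)) = some (r, v) := by
  induction t with
  | nil => rfl
  | cons kv t ih =>
    have hr : ¬ (kv.2.1 < r) := not_lt.2 (h kv (List.mem_cons_self))
    simp only [List.foldl_cons, vkStep, hr, decide_false, Bool.and_false, if_neg Bool.false_ne_true]
    exact ih (fun x hx => h x (List.mem_cons_of_mem _ hx))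

-- on a rank-nondecreasing table, the loop returns the first matching entry
theorem vkStep_foldl_none (ql : String) (t : List (String × Int × String))
    (h : t.Pairwise (fun a b => a.2.1 ≤ b.2.1)) :
    t.foldl (vkStep ql) none = (t.find? (fun kv => PySem.Str.isIn kv.1 ql)).map Prod.snd := by
  induction t with
  | nil => rfl
  | cons kv t ih =>
    rcases List.pairwise_cons.1 h with ⟨hhead, htail⟩
    cases hm : PySem.Str.isIn kv.1 ql with
    | true =>
      rw [List.foldl_cons]
      have hm' : PySem.Chars.isIn kv.1.toList ql.toList = true := by simpa using hm
      have h1 : vkStep ql none kv = some (kv.2.1, kv.2.2) := by simp [vkStep, hm']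
      rw [h1, vkStep_foldl_some ql t kv.2.1 kv.2.2 hhead]
      simp only [List.find?_cons, hm, Option.map_some]
    | false =>
      rw [List.foldl_cons]
      have hm' : PySem.Chars.isIn kv.1.toList ql.toList = false := by simpa using hm
      have h1 : vkStep ql none kv = none := by simp [vkStep, hm']
      rw [h1, ih htail]
      simp only [List.find?_cons, hm]

-- ===== VERDICT (by name: the statement is the Claim_ definition above) =====
theorem get_vehicle_type_from_query_py_spec : Claim_equal_get_vehicle_type_from_query_py := by
  intro query _
  unfold Spec_get_vehicle_type_from_query_py
  simp only [get_vehicle_type_from_query_py, get_vehicle_type_from_query_py_alt]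
  rw [vkStep_foldl_none _ _ (by decide)]
  unfold vehicleKeywords
  simp only [List.find?_cons, List.any_cons, List.any_nil, List.find?_nil]
  rcases Bool.eq_false_or_eq_true (PySem.Str.isIn "suv" (PySem.Str.lower query)) with h1 | h1
  · simp_all
  · simp only [h1, Bool.false_or]
    rcases Bool.eq_false_or_eq_true (PySem.Str.isIn "crossover" (PySem.Str.lower query)) with h2 | h2
    · simp_all
    · simp only [h2, Bool.false_or]
      rcases Bool.eq_false_or_eq_true (PySem.Str.isIn "family vehicle" (PySem.Str.lower query)) with h3 | h3
      · simp_all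
      · simp only [h3, Bool.false_or]
        rcases Bool.eq_false_or_eq_true (PySem.Str.isIn "sedan" (PySem.Str.lower query)) with h4 | h4
        · simp_all
        · simp only [h4, Bool.false_or]
          rcases Bool.eq_false_or_eq_true (PySem.Str.isIn "saloon" (PySem.Str.lower query)) with h5 | h5
          · simp_all
          · simp only [h5, Bool.false_or]
            rcases Bool.eq_false_or_eq_true (PySem.Str.isIn "four door" (PySem.Str.lower query)) with h6 | h6
            · simp_all
            · simp only [h6, Bool.false_or]
              rcases Bool.eq_false_or_eq_true (PySem.Str.isIn "coupe" (PySem.Str.lower query)) with h7 | h7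
              · simp_all
              · simp only [h7, Bool.false_or]
                rcases Bool.eq_false_or_eq_true (PySem.Str.isIn "sports car" (PySem.Str.lower query)) with h8 | h8
                · simp_all
                · simp only [h8, Bool.false_or]
                  rcases Bool.eq_false_or_eq_true (PySem.Str.isIn "two door" (PySem.Str.lower query)) with h9 | h9
                  · simp_all
                  · simp only [h9, Bool.false_or]
                    rcases Bool.eq_false_or_eq_true (PySem.Str.isIn "truck" (PySem.Str.lower query)) with h10 | h10
                    · simp_all
                    · simp only [h10, Bool.false_or]
                      rcases Bool.eq_false_or_eq_true (PySem.Str.isIn "pickup" (PySem.Str.lower query)) with h11 | h11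
                      · simp_all
                      · simp only [h11, Bool.false_or]
                        rcases Bool.eq_false_or_eq_true (PySem.Str.isIn "convertible" (PySem.Str.lower query)) with h12 | h12
                        · simp_all
                        · simp only [h12, Bool.false_or]
                          rcases Bool.eq_false_or_eq_true (PySem.Str.isIn "cabriolet" (PySem.Str.lower query)) with h13 | h13
                          · simp_all
                          · simp only [h13, Bool.false_or]
                            rcases Bool.eq_false_or_eq_true (PySem.Str.isIn "roadster" (PySem.Str.lower query)) with h14 | h14
                            · simp_all
                            · simp only [h14, Bool.false_or]
                              rcases Bool.eq_false_or_eq_true (PySem.Str.isIn "wagon" (PySem.Str.lower query)) with h15 | h15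
                              · simp_all
                              · simp only [h15, Bool.false_or]
                                rcases Bool.eq_false_or_eq_true (PySem.Str.isIn "estate" (PySem.Str.lower query)) with h16 | h16
                                · simp_all
                                · simp only [h16, Bool.false_or]
                                  rcases Bool.eq_false_or_eq_true (PySem.Str.isIn "touring" (PySem.Str.lower query)) with h17 | h17
                                  · simp_all
                                  · simp only [h17, Bool.false_or]
                                    rcases Bool.eq_false_or_eq_true (PySem.Str.isIn "minivan" (PySem.Str.lower query)) with h18 | h18
                                    · simp_all
                                    · simp only [h18, Bool.false_or]
                                      rcases Bool.eq_false_or_eq_true (PySem.Str.isIn "mpv" (PySem.Str.lower query)) with h19 | h19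
                                      · simp_all
                                      · simp only [h19, Bool.false_or]
                                        rcases Bool.eq_false_or_eq_true (PySem.Str.isIn "van" (PySem.Str.lower query)) with h20 | h20
                                        · simp_all
                                        · simp only [h20, Bool.false_or]
                                          rcases Bool.eq_false_or_eq_true (PySem.Str.isIn "hatchback" (PySem.Str.lower query)) with h21 | h21
                                          · simp_all
                                          · simp only [h21, Bool.false_or]
                                            rcases Bool.eq_false_or_eq_true (PySem.Str.isIn "hot hatch" (PySem.Str.lower query)) with h22 | h22
                                            · simp_all
                                            · simp only [h22, Bool.false_or]
                                              rfl
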